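-- pv_equiv track=rewrite | github.com/cimbaIG/100_days_of_code_Python_Pro_Bootcamp_for_2022_Public_version | Day_9/Blind_auction_program/blind_auction.py | max_bid
-- ===== SOURCE A (Python) =====
-- def max_bid(bidders):
--     keyList = []
--     bidList = []
--     for key in bidders:
--         keyList.append(key)
--         bidList.append(bidders[key])
--     maxBid = max(bidList)
--     maxBidder = keyList[bidList.index(maxBid)]
--     return maxBidder, maxBid #Function return a tuple of values maxBidder and maxBid
-- ===== SOURCE B (Python) =====
-- def max_bid(bidders):
--     ranking = sorted(bidders.items(), key=lambda kv: -kv[1])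
--     return ranking[0]
-- ===== Notes on version B (the rewrite author's own statement) =====
-- stated objective: alternative
-- what changed: Replaces the parallel-lists pass, the max over the values list and the index back-lookup with sort-then-pick: stably sort the items by descending bid and return the first element (stability keeps the first bidder ahead on ties).
import Mathlib
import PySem

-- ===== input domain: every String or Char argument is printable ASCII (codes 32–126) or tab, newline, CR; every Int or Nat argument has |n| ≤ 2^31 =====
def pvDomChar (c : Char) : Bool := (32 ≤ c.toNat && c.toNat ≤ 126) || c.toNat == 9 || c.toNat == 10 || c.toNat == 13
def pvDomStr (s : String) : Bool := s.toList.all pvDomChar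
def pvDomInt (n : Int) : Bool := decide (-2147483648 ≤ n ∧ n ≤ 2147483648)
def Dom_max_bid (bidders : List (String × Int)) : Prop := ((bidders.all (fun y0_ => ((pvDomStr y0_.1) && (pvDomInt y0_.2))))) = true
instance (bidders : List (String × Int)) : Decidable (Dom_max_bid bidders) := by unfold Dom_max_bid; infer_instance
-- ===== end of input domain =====

-- B replaces A's two parallel lists + max-over-values + index back-lookup with sort-then-pick: stable sort by descending bid, take the first item (alternative algorithm, not faster).


-- ===== PORT A =====
-- for key in bidders: keyList.append(key); bidList.append(bidders[key])  — dict lookup, getD default unreachable (key comes from the dict)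
def max_bid (bidders : List (String × Int)) : String × Int :=
  let d : PySem.Dict String Int := PySem.Dict.mk bidders
  let lists := bidders.foldl
    (fun (acc : List String × List Int) kv => (acc.1 ++ [kv.1], acc.2 ++ [d.getD kv.1 0])) ([], [])
  let keyList := lists.1
  let bidList := lists.2
  match PySem.List.max? bidList (fun v => v) with
  | none => ("", 0)  -- max([]) raises ValueError; excluded by Pre_
  | some maxBid =>
    let i := (PySem.List.index? bidList maxBid).getD 0  -- always some: maxBid ∈ bidList
    let maxBidder := (PySem.List.pyGet? keyList (i : Int)).getD ""  -- always in range
    (maxBidder, maxBid)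

-- ===== PORT B =====
-- ranking = sorted(bidders.items(), key=lambda kv: -kv[1]); return ranking[0]
def max_bid_alt (bidders : List (String × Int)) : String × Int :=
  let ranking := PySem.List.sorted bidders (fun kv => (-kv.2 : Int))
  (PySem.List.pyGet? ranking (0 : Int)).getD ("", 0)  -- none = IndexError on empty dict; excluded by Pre_

-- ===== PRECONDITION & SPEC =====
-- Pre_ excludes the empty dict (both programs raise: A ValueError from max([]), B IndexError from [0])
-- and assoc lists with duplicate keys, which do not represent a Python dict (the parameter is a dict, so its keys are distinct).
def Pre_max_bid (bidders : List (String × Int)) : Prop :=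
  bidders ≠ [] ∧ (bidders.map Prod.fst).Nodup
instance (bidders : List (String × Int)) : Decidable (Pre_max_bid bidders) := by unfold Pre_max_bid; infer_instance
def pvWitness_max_bid : (List (String × Int)) := [("Ann", 3), ("Bob", 7)]

def Spec_max_bid (bidders : List (String × Int)) (out : String × Int) : Prop := out = max_bid_alt bidders
instance (bidders : List (String × Int)) (out : String × Int) : Decidable (Spec_max_bid bidders out) := by unfold Spec_max_bid; infer_instance

-- ===== CLAIM (what is proved, stated in full; the proofs are below) =====
def Claim_equal_max_bid : Prop := ∀ (bidders : List (String × Int)), Dom_max_bid bidders → Pre_max_bid bidders → Spec_max_bid bidders (max_bid bidders)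

-- ===== LEMMAS AND PROOFS =====

-- the "first bidder with the maximal bid" both programs compute: seed a, strictly greater bids replace
def pvBest {α : Type} (key : α → Int) (a : α) : List α → α
  | [] => a
  | x :: t => pvBest key (if key a < key x then x else a) t

theorem pvBest_foldl {α : Type} (key : α → Int) (t : List α) (a : α) :
    t.foldl (fun acc x =>
        match acc with
        | none => some x
        | some m => if key m < key x then some x else some m) (some a) = some (pvBest key a t) := by
  induction t generalizing a with
  | nil => rfl
  | cons x t ih =>
      simp only [List.foldl_cons, pvBest]
      by_cases h : key a < key x <;> simp [h, ih]

theorem max?_cons_eq_pvBest {α : Type} (key : α → Int) (a : α) (t : List α) :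
    PySem.List.max? (a :: t) key = some (pvBest key a t) := by
  simp only [PySem.List.max?, List.foldl_cons]
  exact pvBest_foldl key t a

theorem pvBest_first {α : Type} (key : α → Int) (t : List α) (a : α) :
    pvBest key a t = a ∨
      ∃ pre suf, t = pre ++ pvBest key a t :: suf ∧ key a < key (pvBest key a t) ∧
        ∀ y ∈ pre, key y < key (pvBest key a t) := by
  induction t generalizing a with
  | nil => exact Or.inl rfl
  | cons x t ih =>
      simp only [pvBest]
      by_cases h : key a < key x
      · simp only [if_pos h]
        right
        rcases ih x with hx | ⟨pre, suf, ht, hlt, hpre⟩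
        · exact ⟨[], t, by simp [hx], by rw [hx]; exact h, by simp⟩
        · refine ⟨x :: pre, suf, by rw [List.cons_append]; exact congrArg _ ht, lt_trans h hlt, ?_⟩
          intro y hy
          rcases List.mem_cons.mp hy with he | hy
          · rw [he]; exact hlt
          · exact hpre y hy
      · simp only [if_neg h]
        rcases ih a with ha | ⟨pre, suf, ht, hlt, hpre⟩
        · exact Or.inl ha
        · right
          refine ⟨x :: pre, suf, by rw [List.cons_append]; exact congrArg _ ht, hlt, ?_⟩
          intro y hy
          rcases List.mem_cons.mp hy with he | hy
          · rw [he]; exact lt_of_le_of_lt (le_of_not_gt h) hlt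
          · exact hpre y hy

-- (l ++ a :: r)[len(l)] = a, for the keyList back-lookup via pyGet?
theorem pvGet_append (l : List String) (a : String) (r : List String) :
    (PySem.List.pyGet? (l ++ a :: r) ((l.length : Nat) : Int)).getD "" = a := by
  rw [PySem.List.pyGet?_append_length]
  rfl

-- projecting the best through the value map
theorem pvBest_map_snd (t : List (String × Int)) (a : String × Int) :
    pvBest (fun v => v) a.2 (t.map Prod.snd) = (pvBest (fun p => p.2) a t).2 := by
  induction t generalizing a with
  | nil => rfl
  | cons x t ih =>
      simp only [List.map_cons, pvBest]
      by_cases h : a.2 < x.2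
      · simp only [if_pos h]; exact ih x
      · simp only [if_neg h]; exact ih a

-- head of B's insertion sort (key = -bid): each inserted x takes the head iff it strictly beats it,
-- which is exactly pvBest's replacement rule on the bids
theorem pv_head_foldl_insertBy (t : List (String × Int)) :
    ∀ (m : String × Int) (rest : List (String × Int)),
      (t.foldl (fun acc x =>
          PySem.List.insertBy (fun a b => decide ((-a.2 : Int) < -b.2)) x acc) (m :: rest)).head?
        = some (pvBest (fun q => q.2) m t) := by
  induction t with
  | nil => intro m rest; rfl
  | cons x t ih =>
      intro m rest
      simp only [List.foldl_cons, PySem.List.insertBy, pvBest]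
      by_cases h : m.2 < x.2
      · rw [if_pos (by simpa using (by omega : (-x.2 : Int) < -m.2)), if_pos h]
        exact ih x (m :: rest)
      · rw [if_neg (by simpa using (by omega : ¬ ((-x.2 : Int) < -m.2))), if_neg h]
        exact ih m _

theorem pv_max_bid_eq (h : String × Int) (t : List (String × Int))
    (hnd : ((h :: t).map Prod.fst).Nodup) :
    max_bid (h :: t) = max_bid_alt (h :: t) := by
  -- split the list around the winner: everything before it has a strictly smaller bid
  obtain ⟨pre, suf, hsplit, hprelt⟩ :
      ∃ pre suf, h :: t = pre ++ pvBest (fun q => q.2) h t :: suf ∧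
        ∀ y ∈ pre, y.2 < (pvBest (fun q => q.2) h t).2 := by
    rcases pvBest_first (fun q => q.2) t h with h0 | ⟨pre, suf, ht, hlt, hpre⟩
    · exact ⟨[], t, by simp [h0], by simp⟩
    · refine ⟨h :: pre, suf, by rw [List.cons_append]; exact congrArg _ ht, ?_⟩
      intro y hy
      rcases List.mem_cons.mp hy with he | hy
      · rw [he]; exact hlt
      · exact hpre y hy
  set P : String × Int := pvBest (fun q => q.2) h t with hP
  -- B's side: the sorted ranking starts with P
  have hhead : (PySem.List.sorted (h :: t) (fun kv => (-kv.2 : Int))).head? = some P := by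
    rw [PySem.List.sorted_eq_foldl_insertBy]
    simp only [List.foldl_cons]
    exact pv_head_foldl_insertBy t h []
  obtain ⟨rest, hrank⟩ : ∃ rest, PySem.List.sorted (h :: t) (fun kv => (-kv.2 : Int)) = P :: rest := by
    rcases hr : PySem.List.sorted (h :: t) (fun kv => (-kv.2 : Int)) with _ | ⟨m, rest⟩
    · rw [hr] at hhead; cases hhead
    · rw [hr] at hhead
      exact ⟨rest, by simpa using hhead⟩
  have hB : max_bid_alt (h :: t) = P := by
    rw [max_bid_alt]
    simp only [hrank]
    simp [PySem.List.pyGet?, PySem.List.pyIdx?]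
  -- A's side: the loop builds the two projection lists; dict lookups return each pair's own value
  have hlookup : ∀ kv ∈ h :: t, (PySem.Dict.mk (h :: t)).getD kv.1 0 = kv.2 := by
    intro kv hkv
    have hm : ((kv.1, kv.2) : String × Int) ∈ (PySem.Dict.mk (h :: t)).items := by simpa using hkv
    exact PySem.Dict.getD_of_mem_items _ hm (by simpa [PySem.Dict.keys] using hnd) 0
  have hfold : (h :: t).foldl
      (fun (acc : List String × List Int) kv =>
        (acc.1 ++ [kv.1], acc.2 ++ [(PySem.Dict.mk (h :: t)).getD kv.1 0])) ([], [])
      = ((h :: t).map Prod.fst, (h :: t).map Prod.snd) := by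
    rw [PySem.List.foldl_prod_mk (f := fun acc (kv : String × Int) => acc ++ [kv.1])
          (g := fun acc (kv : String × Int) => acc ++ [(PySem.Dict.mk (h :: t)).getD kv.1 0])]
    rw [PySem.List.foldl_append_singleton_eq_map, PySem.List.foldl_append_singleton_eq_map]
    simp only [List.nil_append]
    exact congrArg _ (List.map_congr_left hlookup)
  have hvals : (h :: t).map Prod.snd = pre.map Prod.snd ++ P.2 :: suf.map Prod.snd := by
    rw [hsplit]; simp
  have hmax : PySem.List.max? ((h :: t).map Prod.snd) (fun v => v) = some P.2 := by
    rw [List.map_cons, max?_cons_eq_pvBest, pvBest_map_snd]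
  have hidx : PySem.List.index? ((h :: t).map Prod.snd) P.2 = some pre.length := by
    rw [PySem.List.index?_eq_some_iff]
    refine ⟨pre.map Prod.snd, suf.map Prod.snd, hvals, by simp, ?_⟩
    intro hmem
    obtain ⟨y, hy, hy2⟩ := List.mem_map.mp hmem
    exact absurd hy2 (ne_of_lt (hprelt y hy))
  have hkl : (h :: t).map Prod.fst = pre.map Prod.fst ++ P.1 :: suf.map Prod.fst := by
    rw [hsplit]; simp
  have hA : max_bid (h :: t) = (P.1, P.2) := by
    rw [max_bid]
    simp only [hfold, hmax, hidx, Option.getD_some]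
    rw [hkl]
    have hg := pvGet_append (pre.map Prod.fst) P.1 (suf.map Prod.fst)
    simp only [List.length_map] at hg
    rw [hg]
  rw [hA, hB]

-- ===== VERDICT (by name: the statement is the Claim_ definition above) =====
theorem max_bid_spec : Claim_equal_max_bid := by
  intro bidders _ hpre
  unfold Spec_max_bid
  rcases bidders with _ | ⟨h, t⟩
  · exact absurd rfl hpre.1
  · exact pv_max_bid_eq h t hpre.2
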